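-- pv_equiv track=rewrite | github.com/mnikn/Compilers | nfsTurnFsm.py | cfginfinite
-- ===== SOURCE A (Python) =====
-- def cfginfinite(grammar):
--     for q in [rule[0] for rule in grammar]:
--         def helper(current,visited,sizexy):
--             if current in visited:
--                 return sizexy>0
--             else:
--                 new_visited = visited + [current]
--                 for rhs in [rule[1] for rule in grammar if rule[0]==current]:
--                     for symbol in rhs:
--                         if helper(symbol,new_visited,sizexy+len(rhs)-1):
--                             return True
--                 return False
--
--         if helper(q,[],0):
--             return True
--     return False
-- ===== SOURCE B (Python) =====
-- def cfginfinite(grammar):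
--     stack = [(q, (), 0) for q in [rule[0] for rule in grammar]]
--     while stack:
--         current, visited, sizexy = stack.pop(0)
--         if current in visited:
--             if sizexy > 0:
--                 return True
--         else:
--             children = []
--             for lhs, rhs in grammar:
--                 if lhs == current:
--                     for symbol in rhs:
--                         children.append((symbol, visited + (current,), sizexy + len(rhs) - 1))
--             stack = children + stack
--     return False
-- ===== Notes on version B (the rewrite author's own statement) =====
-- stated objective: alternative
-- what changed: Replaces the per-start-symbol recursive helper (with early-return nested loops) by a single iterative worklist DFS over explicit frames (symbol, visited-tuple, accumulated weight), seeded with all start symbols at once.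
import Mathlib
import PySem

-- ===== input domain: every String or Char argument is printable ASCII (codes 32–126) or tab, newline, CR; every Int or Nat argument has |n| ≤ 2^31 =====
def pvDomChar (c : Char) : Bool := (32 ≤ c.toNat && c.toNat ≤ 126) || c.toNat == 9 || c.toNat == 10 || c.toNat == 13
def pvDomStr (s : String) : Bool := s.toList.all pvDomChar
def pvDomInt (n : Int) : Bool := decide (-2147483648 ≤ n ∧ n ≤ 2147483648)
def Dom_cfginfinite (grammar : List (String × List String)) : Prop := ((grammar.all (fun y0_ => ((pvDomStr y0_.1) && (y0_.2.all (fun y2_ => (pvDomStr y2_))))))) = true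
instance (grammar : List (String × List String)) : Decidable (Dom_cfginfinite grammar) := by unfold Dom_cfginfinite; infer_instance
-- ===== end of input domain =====

-- B replaces the per-start-symbol recursive helper by one iterative worklist DFS over
-- explicit (symbol, visited, weight) frames; same exact result (objective: alternative).

-- ===== PORT A =====
-- A's recursive helper; the fuel argument only makes the recursion total: the Python
-- recursion depth is bounded by the number of distinct left-hand sides + 1, so starting
-- from grammar.length + 1 the fuel is never exhausted (each recursion step adds a fresh
-- distinct lhs symbol to visited).
def pvHelperA (grammar : List (String × List String)) : Nat → String → List String → Int → Bool
  | n, current, visited, sizexy =>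
    if visited.contains current then decide (sizexy > 0)
    else
      match n with
      | 0 => false
      | Nat.succ m =>
        ((grammar.filter (fun rule => rule.1 == current)).map (fun rule => rule.2)).any
          (fun rhs => rhs.any (fun symbol =>
            pvHelperA grammar m symbol (visited ++ [current]) (sizexy + (rhs.length : Int) - 1)))
termination_by n => n

def cfginfinite (grammar : List (String × List String)) : Bool :=
  (grammar.map (fun rule => rule.1)).any (fun q => pvHelperA grammar (grammar.length + 1) q [] 0)

-- ===== PORT B =====
-- the frames pushed for one popped frame (the inner double loop of Source B)
def pvChildren (grammar : List (String × List String)) (m : Nat) (current : String)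
    (visited : List String) (sizexy : Int) : List (Nat × String × List String × Int) :=
  (grammar.filter (fun rule => rule.1 == current)).flatMap (fun rule =>
    rule.2.map (fun symbol => (m, symbol, visited ++ [current], sizexy + (rule.2.length : Int) - 1)))

-- termination measure for the worklist loop
def pvK (grammar : List (String × List String)) : Nat :=
  (grammar.map (fun rule => rule.2.length)).sum + 2

def pvMeasure (K : Nat) (stack : List (Nat × String × List String × Int)) : Nat :=
  (stack.map (fun f => K ^ f.1)).sum

theorem pv_sum_map_const {α : Type} (w : α → Nat) (c : Nat) :
    ∀ (l : List α), (∀ x ∈ l, w x = c) → (l.map w).sum = l.length * c := by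
  intro l
  induction l with
  | nil => simp
  | cons a t ih =>
    intro h
    simp [h a (by simp), ih (fun x hx => h x (by simp [hx])), Nat.succ_mul]
    omega

theorem pv_sublist_sum_le {l₁ l₂ : List Nat} (h : l₁.Sublist l₂) : l₁.sum ≤ l₂.sum := by
  induction h with
  | slnil => simp
  | cons a _ ih => simp; omega
  | cons₂ a _ ih => simp; omega

theorem pvChildren_measure (grammar : List (String × List String)) (m : Nat) (c : String)
    (v : List String) (s : Int) :
    pvMeasure (pvK grammar) (pvChildren grammar m c v s) < pvK grammar ^ (m + 1) := by
  have hK : 2 ≤ pvK grammar := by simp [pvK]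
  have hconst : (∀ f ∈ pvChildren grammar m c v s, (fun f : Nat × String × List String × Int => pvK grammar ^ f.1) f = pvK grammar ^ m) := by
    intro f hf
    simp [pvChildren, List.mem_flatMap, List.mem_map] at hf
    obtain ⟨r, _, sym, _, hfe⟩ := hf
    simp [← hfe]
  have hlen : (pvChildren grammar m c v s).length ≤ pvK grammar - 2 := by
    have h1 : (pvChildren grammar m c v s).length
        = ((grammar.filter (fun rule => rule.1 == c)).map (fun rule => rule.2.length)).sum := by
      simp [pvChildren, List.length_flatMap]
    have h2 : ((grammar.filter (fun rule => rule.1 == c)).map (fun rule => rule.2.length)).Sublist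
        (grammar.map (fun rule => rule.2.length)) :=
      List.filter_sublist.map _
    have := pv_sublist_sum_le h2
    simp [pvK]; omega
  have hmeas : pvMeasure (pvK grammar) (pvChildren grammar m c v s)
      = (pvChildren grammar m c v s).length * pvK grammar ^ m :=
    pv_sum_map_const _ _ _ hconst
  have hpow : 0 < pvK grammar ^ m := Nat.pow_pos (by omega)
  calc pvMeasure (pvK grammar) (pvChildren grammar m c v s)
      ≤ (pvK grammar - 2) * pvK grammar ^ m := by rw [hmeas]; exact Nat.mul_le_mul_right _ hlen
    _ < pvK grammar * pvK grammar ^ m := by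
        apply Nat.mul_lt_mul_of_lt_of_le (by omega) (le_refl _)
        omega
    _ = pvK grammar ^ (m + 1) := by ring

-- the worklist loop of Source B; frames carry fuel only to make the loop total (never
-- exhausted when started at grammar.length + 1, as for pvHelperA)
def pvRunB (grammar : List (String × List String)) :
    List (Nat × String × List String × Int) → Bool
  | [] => false
  | (n, current, visited, sizexy) :: rest =>
    if visited.contains current then
      (if sizexy > 0 then true else pvRunB grammar rest)
    else
      match n with
      | 0 => pvRunB grammar rest
      | Nat.succ m => pvRunB grammar (pvChildren grammar m current visited sizexy ++ rest)
termination_by stack => pvMeasure (pvK grammar) stack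
decreasing_by
  · simp only [pvMeasure, List.map_cons, List.sum_cons]
    have : 0 < pvK grammar ^ n := Nat.pow_pos (by simp [pvK])
    omega
  · simp only [pvMeasure, List.map_cons, List.sum_cons]
    have : 0 < pvK grammar ^ 0 := Nat.pow_pos (by simp [pvK])
    omega
  · have := pvChildren_measure grammar m current visited sizexy
    simp only [pvMeasure, List.map_cons, List.sum_cons, List.map_append, List.sum_append, Nat.succ_eq_add_one] at *
    omega

def cfginfinite_alt (grammar : List (String × List String)) : Bool :=
  pvRunB grammar
    ((grammar.map (fun rule => rule.1)).map (fun q => (grammar.length + 1, q, ([] : List String), (0 : Int))))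

-- ===== PRECONDITION & SPEC =====
def Spec_cfginfinite (grammar : List (String × List String)) (out : Bool) : Prop := out = cfginfinite_alt grammar
instance (grammar : List (String × List String)) (out : Bool) : Decidable (Spec_cfginfinite grammar out) := by unfold Spec_cfginfinite; infer_instance

-- ===== CLAIM (what is proved, stated in full; the proofs are below) =====
def Claim_equal_cfginfinite : Prop := ∀ (grammar : List (String × List String)), Dom_cfginfinite grammar → Spec_cfginfinite grammar (cfginfinite grammar)

-- ===== LEMMAS AND PROOFS =====
-- unfolding equations for pvHelperA (cited by the proofs below)
theorem pvHelperA_contains (grammar : List (String × List String)) (n : Nat) (c : String) (v : List String) (s : Int)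
    (hc : v.contains c = true) : pvHelperA grammar n c v s = decide (s > 0) := by
  rw [pvHelperA.eq_def]; simp [List.contains_eq_mem] at hc; simp [hc]

theorem pvHelperA_zero (grammar : List (String × List String)) (c : String) (v : List String) (s : Int)
    (hc : v.contains c = false) : pvHelperA grammar 0 c v s = false := by
  rw [pvHelperA.eq_def]; simp [List.contains_eq_mem] at hc; simp [hc]

theorem pvHelperA_succ (grammar : List (String × List String)) (m : Nat) (c : String) (v : List String) (s : Int)
    (hc : v.contains c = false) :
    pvHelperA grammar (m + 1) c v s =
      ((grammar.filter (fun rule => rule.1 == c)).map (fun rule => rule.2)).any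
        (fun rhs => rhs.any (fun symbol =>
          pvHelperA grammar m symbol (v ++ [c]) (s + (rhs.length : Int) - 1))) := by
  rw [pvHelperA.eq_def]; simp [List.contains_eq_mem] at hc; simp [hc]

-- the worklist returns true iff A's helper returns true on some frame of the stack
theorem pvRunB_eq_any (grammar : List (String × List String)) (stack : List (Nat × String × List String × Int)) :
    pvRunB grammar stack = stack.any (fun f => pvHelperA grammar f.1 f.2.1 f.2.2.1 f.2.2.2) := by
  fun_induction pvRunB grammar stack with
  | case1 => simp
  | case2 n c v s rest hc hs =>
    rw [List.any_cons, pvHelperA_contains grammar n c v s hc]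
    simp [hs]
  | case3 n c v s rest hc hs ih =>
    rw [ih, List.any_cons, pvHelperA_contains grammar n c v s hc]
    simp [hs]
  | case4 c v s rest hc ih =>
    replace hc := eq_false_of_ne_true hc
    rw [ih, List.any_cons, pvHelperA_zero grammar c v s hc]
    simp
  | case5 c v s rest hc m ih =>
    replace hc := eq_false_of_ne_true hc
    rw [ih, List.any_append, List.any_cons, pvHelperA_succ grammar m c v s hc]
    simp [pvChildren, Function.comp_def]

-- ===== VERDICT (by name: the statement is the Claim_ definition above) =====
theorem cfginfinite_spec : Claim_equal_cfginfinite := by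
  intro grammar _
  unfold Spec_cfginfinite cfginfinite cfginfinite_alt
  rw [pvRunB_eq_any]
  simp [Function.comp_def]
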